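-- pv_equiv track=rewrite | github.com/Revelate123/Foundation | main.py | pile_grillage
-- ===== SOURCE A (Python) =====
-- def pile_grillage(x_spacing, y_spacing, x_rows, y_rows):
--     #2D array of pile locations outer = y inner = x
--     locations = [[[0] for i in range(y_rows)]for j in range(x_rows)]
--     x_location = 0
--
--     for x in range(x_rows):
--         y_location = 0
--         for y in range(y_rows):
--             locations[x][y] = [x_location,y_location]
--             y_location += y_spacing
--         x_location += x_spacing
--     return locations
-- ===== SOURCE B (Python) =====
-- def pile_grillage(x_spacing, y_spacing, x_rows, y_rows):
--     # Build the first row (x=0) from a cumulatively-accumulated y coordinate list,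
--     # then derive each subsequent row from the previous one by translating every
--     # pile by x_spacing in x.  Correct because A's row x is exactly row x-1
--     # shifted by x_spacing.
--     if x_rows <= 0:
--         return []  # no rows: empty grid, no coordinates needed
--     ys = []
--     y = 0
--     for _ in range(y_rows):
--         ys.append(y)
--         y += y_spacing
--     row = [[0, y] for y in ys]
--     grid = []
--     for _ in range(x_rows):
--         grid.append(row)
--         row = [[p[0] + x_spacing, p[1]] for p in row]
--     return grid
-- ===== Notes on version B (the rewrite author's own statement) =====
-- stated objective: alternative
-- what changed: Instead of pre-allocating a placeholder grid and filling every cell from two running accumulators, B builds only the first row (x=0) from a cumulative y-coordinate list and generates each further row as a translation of the previous row by x_spacing, never computing per-cell coordinates from scratch.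
import Mathlib
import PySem

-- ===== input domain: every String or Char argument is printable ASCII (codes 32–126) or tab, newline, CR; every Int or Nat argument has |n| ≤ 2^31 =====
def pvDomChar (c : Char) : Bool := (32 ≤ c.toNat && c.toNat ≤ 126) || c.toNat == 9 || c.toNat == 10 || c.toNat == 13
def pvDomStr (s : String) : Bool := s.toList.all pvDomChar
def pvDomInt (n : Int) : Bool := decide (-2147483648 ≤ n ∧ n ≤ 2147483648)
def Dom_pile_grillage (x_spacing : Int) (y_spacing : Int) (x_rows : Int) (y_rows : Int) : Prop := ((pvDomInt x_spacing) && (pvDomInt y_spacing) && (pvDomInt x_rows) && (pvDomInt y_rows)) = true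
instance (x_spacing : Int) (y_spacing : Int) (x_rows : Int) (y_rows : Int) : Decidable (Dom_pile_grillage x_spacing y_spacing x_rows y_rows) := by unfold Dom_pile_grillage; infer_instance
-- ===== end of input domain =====

-- B builds only the first row from a cumulative y list and derives each further row by
-- translating the previous row by x_spacing, instead of A's placeholder grid mutated cell
-- by cell from two running accumulators; objective: alternative algorithm, same cost.

-- ===== PORT A =====
-- Literal port of A: build the placeholder grid, then two nested loops carrying
-- (locations, x_location) and (locations, y_location), assigning via pySetD/pyGetD
-- (exact: every index written is a range value, hence in range).
def pile_grillage (x_spacing : Int) (y_spacing : Int) (x_rows : Int) (y_rows : Int) : List (List (List Int)) :=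
  let locations : List (List (List Int)) :=
    (PySem.List.pyRange 0 x_rows 1).map (fun _ =>
      (PySem.List.pyRange 0 y_rows 1).map (fun _ => ([0] : List Int)))
  let res :=
    (PySem.List.pyRange 0 x_rows 1).foldl
      (fun (st : List (List (List Int)) × Int) x =>
        let inner :=
          (PySem.List.pyRange 0 y_rows 1).foldl
            (fun (st2 : List (List (List Int)) × Int) y =>
              (PySem.List.pySetD st2.1 x
                 (PySem.List.pySetD (PySem.List.pyGetD st2.1 x []) y [st.2, st2.2]),
               st2.2 + y_spacing))
            (st.1, 0)
        (inner.1, st.2 + x_spacing))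
      (locations, 0)
  res.1

-- ===== PORT B =====
-- Port of Source B: the ys accumulation loop, the first row, then the outer loop whose
-- state is (grid so far, current row); the next row is the current one translated.
-- p[0]/p[1] are ported as pyGetD with default 0 (exact here: every row element is a
-- 2-element list, so the index is always in range and the default is never used).
def pile_grillage_alt (x_spacing : Int) (y_spacing : Int) (x_rows : Int) (y_rows : Int) : List (List (List Int)) :=
  if x_rows ≤ 0 then [] else
  let ysAcc :=
    (PySem.List.pyRange 0 y_rows 1).foldl
      (fun (st : List Int × Int) _ => (st.1 ++ [st.2], st.2 + y_spacing)) ([], 0)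
  let row0 := ysAcc.1.map (fun y => ([0, y] : List Int))
  ((PySem.List.pyRange 0 x_rows 1).foldl
    (fun (st : List (List (List Int)) × List (List Int)) _ =>
      (st.1 ++ [st.2],
       st.2.map (fun p => [PySem.List.pyGetD p 0 0 + x_spacing, PySem.List.pyGetD p 1 0])))
    ([], row0)).1

-- ===== PRECONDITION & SPEC =====
def Spec_pile_grillage (x_spacing : Int) (y_spacing : Int) (x_rows : Int) (y_rows : Int) (out : List (List (List Int))) : Prop := out = pile_grillage_alt x_spacing y_spacing x_rows y_rows
instance (x_spacing : Int) (y_spacing : Int) (x_rows : Int) (y_rows : Int) (out : List (List (List Int))) : Decidable (Spec_pile_grillage x_spacing y_spacing x_rows y_rows out) := by unfold Spec_pile_grillage; infer_instance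

-- ===== CLAIM (what is proved, stated in full; the proofs are below) =====
def Claim_equal_pile_grillage : Prop := ∀ (x_spacing : Int) (y_spacing : Int) (x_rows : Int) (y_rows : Int), Dom_pile_grillage x_spacing y_spacing x_rows y_rows → Spec_pile_grillage x_spacing y_spacing x_rows y_rows (pile_grillage x_spacing y_spacing x_rows y_rows)

-- ===== LEMMAS AND PROOFS =====

-- row i of the final grid
def pvRowB (x_spacing y_spacing : Int) (m : Nat) (i : Nat) : List (List Int) :=
  (List.range m).map (fun (j : Nat) => [(i : Int) * x_spacing, (j : Int) * y_spacing])

-- the grid after the first k outer iterations of A: rows < k final, rows ≥ k untouched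
def pvGrid (x_spacing y_spacing : Int) (n m k : Nat) : List (List (List Int)) :=
  (List.range n).map (fun i => if i < k then pvRowB x_spacing y_spacing m i
                               else (List.range m).map (fun _ => ([0] : List Int)))

lemma pv_set_getD_self {α : Type} (g : List α) (x : Nat) (d : α) (hx : x < g.length) :
    g.set x (g[x]?.getD d) = g := by
  apply List.ext_getElem
  · simp
  · intro i h1 h2
    by_cases hix : i = x
    · subst hix; simp [List.getElem?_eq_getElem hx]
    · rw [List.getElem_set, if_neg (by omega)]

-- folding `set j (f j)` over range m onto a prefix produces the map plus the untouched tail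
lemma pv_rowfold (f : Nat → List Int) :
    ∀ (m : Nat) (r : List (List Int)), m ≤ r.length →
      (List.range m).foldl (fun row j => row.set j (f j)) r
        = (List.range m).map f ++ r.drop m := by
  intro m
  induction m with
  | zero => simp
  | succ m ih =>
    intro r hm
    rw [List.range_succ, List.foldl_append, List.foldl_cons, List.foldl_nil,
        ih r (by omega), List.map_append]
    rw [List.set_append_right _ _ (by simp)]
    have hdrop : List.drop m r = r[m] :: List.drop (m + 1) r :=
      List.drop_eq_getElem_cons (by omega)
    rw [hdrop]
    have hlen : m - (List.map f (List.range m)).length = 0 := by simp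
    rw [hlen, List.set_cons_zero]
    simp

-- A's inner loop: sets entries 0..m-1 of row x to [xloc, c + j*ysp], accumulates c
lemma pv_inner (y_spacing xloc : Int) (x : Nat) :
    ∀ (m : Nat) (g : List (List (List Int))) (c : Int), x < g.length →
      ((List.range m).map (fun (y : Nat) => (y : Int))).foldl
        (fun (st2 : List (List (List Int)) × Int) y =>
          (PySem.List.pySetD st2.1 (x : Int)
             (PySem.List.pySetD (PySem.List.pyGetD st2.1 (x : Int) []) y [xloc, st2.2]),
           st2.2 + y_spacing))
        (g, c)
      = (g.set x ((List.range m).foldl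
            (fun row j => row.set j [xloc, c + (j : Int) * y_spacing]) (g[x]?.getD [])),
         c + (m : Int) * y_spacing) := by
  intro m
  induction m with
  | zero =>
    intro g c hx
    simp [pv_set_getD_self g x [] hx]
  | succ m ih =>
    intro g c hx
    rw [List.range_succ, List.map_append, List.foldl_append, ih g c hx]
    simp only [List.map_cons, List.map_nil, List.foldl_cons, List.foldl_nil]
    have hx' : x < (g.set x ((List.range m).foldl
        (fun row j => row.set j [xloc, c + (j : Int) * y_spacing]) (g[x]?.getD []))).length := by
      simpa using hx
    rw [PySem.List.pySetD_natCast, PySem.List.pySetD_natCast]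
    have hget : PySem.List.pyGetD (g.set x ((List.range m).foldl
        (fun row j => row.set j [xloc, c + (j : Int) * y_spacing]) (g[x]?.getD []))) (x : Int) []
        = (List.range m).foldl (fun row j => row.set j [xloc, c + (j : Int) * y_spacing])
            (g[x]?.getD []) := by
      rw [PySem.List.pyGetD_natCast]
      simp [List.getElem?_eq_getElem hx']
    rw [hget, List.set_set]
    simp only [Prod.mk.injEq]
    constructor
    · congr 1
      rw [List.foldl_append, List.foldl_cons, List.foldl_nil]
    · push_cast; ring

lemma pv_grid_length (x_spacing y_spacing : Int) (n m k : Nat) :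
    (pvGrid x_spacing y_spacing n m k).length = n := by simp [pvGrid]

-- A's outer loop: after k iterations the state is (pvGrid … k, k * x_spacing)
lemma pv_outer (x_spacing y_spacing : Int) (n m : Nat) :
    ∀ (k : Nat), k ≤ n →
      ((List.range k).map (fun (x : Nat) => (x : Int))).foldl
        (fun (st : List (List (List Int)) × Int) x =>
          ((((List.range m).map (fun (y : Nat) => (y : Int))).foldl
              (fun (st2 : List (List (List Int)) × Int) y =>
                (PySem.List.pySetD st2.1 x
                   (PySem.List.pySetD (PySem.List.pyGetD st2.1 x []) y [st.2, st2.2]),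
                 st2.2 + y_spacing))
              (st.1, 0)).1,
           st.2 + x_spacing))
        (pvGrid x_spacing y_spacing n m 0, 0)
      = (pvGrid x_spacing y_spacing n m k, (k : Int) * x_spacing) := by
  intro k
  induction k with
  | zero => simp
  | succ k ih =>
    intro hk
    rw [List.range_succ, List.map_append, List.foldl_append, ih (by omega)]
    simp only [List.map_cons, List.map_nil, List.foldl_cons, List.foldl_nil]
    have hk' : k < (pvGrid x_spacing y_spacing n m k).length := by
      rw [pv_grid_length]; omega
    rw [pv_inner y_spacing ((k : Int) * x_spacing) k m _ 0 hk']
    simp only [Prod.mk.injEq]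
    constructor
    · have hrow : (pvGrid x_spacing y_spacing n m k)[k]?.getD []
          = (List.range m).map (fun _ => ([0] : List Int)) := by
        simp [pvGrid, List.getElem?_map, List.getElem?_range (show k < n by omega)]
      rw [hrow, pv_rowfold _ m _ (by simp)]
      simp only [List.drop_eq_nil_of_le (by simp : ((List.range m).map
        (fun _ => ([0] : List Int))).length ≤ m), List.append_nil]
      apply List.ext_getElem
      · simp [pvGrid]
      · intro i h1 h2
        rw [List.getElem_set]
        by_cases hik : k = i
        · subst hik
          rw [if_pos rfl]
          simp only [pvGrid, List.getElem_map, List.getElem_range]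
          rw [if_pos (by omega : k < k + 1)]
          unfold pvRowB
          exact List.map_congr_left (fun j _ => by rw [zero_add])
        · rw [if_neg hik]
          simp only [pvGrid, List.getElem_map, List.getElem_range]
          by_cases hlt : i < k
          · rw [if_pos hlt, if_pos (by omega)]
          · rw [if_neg hlt, if_neg (by omega)]
    · push_cast; ring

-- B's ys loop: appending the accumulator and adding the spacing each step
lemma pv_ysfold (y_spacing : Int) :
    ∀ (m : Nat) (acc : List Int) (c : Int),
      ((List.range m).map (fun (y : Nat) => (y : Int))).foldl
        (fun (st : List Int × Int) _ => (st.1 ++ [st.2], st.2 + y_spacing)) (acc, c)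
      = (acc ++ (List.range m).map (fun (j : Nat) => c + (j : Int) * y_spacing),
         c + (m : Int) * y_spacing) := by
  intro m
  induction m with
  | zero => intro acc c; simp
  | succ m ih =>
    intro acc c
    rw [List.range_succ, List.map_append, List.foldl_append, ih]
    simp only [List.map_cons, List.map_nil, List.foldl_cons, List.foldl_nil,
      List.map_append, List.append_assoc, Prod.mk.injEq]
    refine ⟨trivial, by push_cast; ring⟩

-- B's translation step sends row i to row i+1
lemma pv_step (x_spacing y_spacing : Int) (m i : Nat) :
    (pvRowB x_spacing y_spacing m i).map
        (fun p => [PySem.List.pyGetD p 0 0 + x_spacing, PySem.List.pyGetD p 1 0])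
      = pvRowB x_spacing y_spacing m (i + 1) := by
  unfold pvRowB
  rw [List.map_map]
  apply List.map_congr_left
  intro j _
  simp only [Function.comp_apply, PySem.List.pyGetD, PySem.List.pyGet?, PySem.List.pyIdx?]
  norm_num
  ring

-- B's outer loop: state (grid so far, current row)
lemma pv_bouter (x_spacing y_spacing : Int) (m : Nat) :
    ∀ (k : Nat),
      ((List.range k).map (fun (x : Nat) => (x : Int))).foldl
        (fun (st : List (List (List Int)) × List (List Int)) _ =>
          (st.1 ++ [st.2],
           st.2.map (fun p => [PySem.List.pyGetD p 0 0 + x_spacing, PySem.List.pyGetD p 1 0])))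
        ([], pvRowB x_spacing y_spacing m 0)
      = ((List.range k).map (pvRowB x_spacing y_spacing m), pvRowB x_spacing y_spacing m k) := by
  intro k
  induction k with
  | zero => simp
  | succ k ih =>
    rw [List.range_succ, List.map_append, List.foldl_append, ih]
    simp only [List.map_cons, List.map_nil, List.foldl_cons, List.foldl_nil]
    rw [pv_step, List.map_append]
    rfl

-- the finished grid is the plain map of final rows
lemma pv_grid_full (x_spacing y_spacing : Int) (n m : Nat) :
    pvGrid x_spacing y_spacing n m n = (List.range n).map (pvRowB x_spacing y_spacing m) := by
  unfold pvGrid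
  exact List.map_congr_left (fun i hi => if_pos (List.mem_range.mp hi))

lemma pv_alt_eq (x_spacing y_spacing x_rows y_rows : Int) :
    pile_grillage_alt x_spacing y_spacing x_rows y_rows
      = pvGrid x_spacing y_spacing x_rows.toNat y_rows.toNat x_rows.toNat := by
  unfold pile_grillage_alt
  by_cases hx : x_rows ≤ 0
  · rw [if_pos hx]
    have : x_rows.toNat = 0 := by omega
    simp [this, pvGrid]
  rw [if_neg hx]
  have hrow0 : ((([] : List Int) ++ (List.range y_rows.toNat).map
        (fun (j : Nat) => 0 + (j : Int) * y_spacing)).map (fun y => ([0, y] : List Int)))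
      = pvRowB x_spacing y_spacing y_rows.toNat 0 := by
    unfold pvRowB
    rw [List.nil_append, List.map_map]
    apply List.map_congr_left
    intro j _
    simp
  rw [PySem.List.pyRange_zero, PySem.List.pyRange_zero, pv_ysfold, pv_grid_full]
  simp only [hrow0]
  rw [pv_bouter]

lemma pv_A_eq (xs ys xr yr : Int) :
    pile_grillage xs ys xr yr =
      ((PySem.List.pyRange 0 xr 1).foldl
        (fun (st : List (List (List Int)) × Int) x =>
          (((PySem.List.pyRange 0 yr 1).foldl
              (fun (st2 : List (List (List Int)) × Int) y =>
                (PySem.List.pySetD st2.1 x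
                   (PySem.List.pySetD (PySem.List.pyGetD st2.1 x []) y [st.2, st2.2]),
                 st2.2 + ys)) (st.1, 0)).1,
           st.2 + xs))
        ((PySem.List.pyRange 0 xr 1).map (fun _ =>
          (PySem.List.pyRange 0 yr 1).map (fun _ => ([0] : List Int))), 0)).1 := rfl

-- ===== VERDICT (by name: the statement is the Claim_ definition above) =====
theorem pile_grillage_spec : Claim_equal_pile_grillage := by
  intro xs ys xr yr _
  unfold Spec_pile_grillage
  rw [pv_alt_eq, pv_A_eq, PySem.List.pyRange_zero, PySem.List.pyRange_zero]
  have hinit : (List.map (fun _ => List.map (fun _ => ([0] : List Int))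
        ((List.range yr.toNat).map (fun (y : Nat) => (y : Int))))
        ((List.range xr.toNat).map (fun (x : Nat) => (x : Int))))
      = pvGrid xs ys xr.toNat yr.toNat 0 := by
    unfold pvGrid
    rw [List.map_map, List.map_map]
    apply List.map_congr_left
    intro i _
    rw [if_neg (Nat.not_lt_zero i)]
    rfl
  rw [hinit, pv_outer xs ys xr.toNat yr.toNat xr.toNat (le_refl _)]
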